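-- pv_equiv track=rewrite | github.com/dojinyou/TIL | python/quiz_and_test/mirror.py | quiz4
-- ===== SOURCE A (Python) =====
-- def quiz4(num):
-- 	def is_mirror(n):
-- 		str_n = str(n)
-- 		length = len(str_n)
-- 		if length%2 == 1 :
-- 			if str_n[length//2] not in ["0","1","8"]:
-- 				return False
-- 		for i in range(length//2):
-- 			if str_n[i] in ["0","1","8"] and str_n[i] == str_n[length -1 - i]:
-- 				continue
-- 			if str_n[i] == "6" and str_n[length -1 - i] == "9":
-- 				continue
-- 			if str_n[i] == "9" and str_n[length -1 - i] == "6":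
-- 				continue
-- 			return False
-- 		return True
--
-- 	result = []
-- 	for i in range(num+1):
-- 		if is_mirror(i):
-- 			result.append(i)
-- 	return result
-- ===== SOURCE B (Python) =====
-- _FLIP = {'0': '0', '1': '1', '6': '9', '8': '8', '9': '6'}
--
--
-- def quiz4(num):
--     def mirror(s):
--         return all(c in _FLIP for c in s) and \
--             [_FLIP[c] for c in reversed(s)] == list(s)
--
--     return [i for i in range(num + 1) if mirror(str(i))]
-- ===== Notes on version B (the rewrite author's own statement) =====
-- stated objective: simpler
-- what changed: A tests each candidate with a two-pointer scan over half the digit string plus a separate odd-length middle-digit case; B instead checks that every digit is in the mirror table and that the flipped reversal of the whole string equals the string, filtering the range with a comprehension.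
import Mathlib
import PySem

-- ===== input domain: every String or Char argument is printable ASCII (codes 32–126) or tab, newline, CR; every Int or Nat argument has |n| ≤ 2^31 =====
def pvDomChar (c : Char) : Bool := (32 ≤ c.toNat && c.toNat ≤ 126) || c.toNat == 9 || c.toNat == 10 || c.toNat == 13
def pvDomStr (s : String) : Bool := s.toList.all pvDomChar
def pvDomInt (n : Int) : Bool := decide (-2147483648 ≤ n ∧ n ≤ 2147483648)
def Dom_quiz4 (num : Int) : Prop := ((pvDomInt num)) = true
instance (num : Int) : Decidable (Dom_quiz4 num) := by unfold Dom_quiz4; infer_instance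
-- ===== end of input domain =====

-- B replaces A's two-pointer half-scan with middle-character case analysis by one whole-string
-- check: every digit maps under the mirror table and the mapped reversal equals the string (simpler).

-- ===== PORT A =====
-- is_mirror's body on str(n) (str_n computed first in Python; kept as a helper so the check is
-- stated once). All indices 'i' and 'length-1-i' (i < length//2) and 'length//2' (odd length ≥ 1)
-- are in range in Python, so pyGetD's default ' ' is never used; the early-return-False loop is
-- the List.all of its per-index test.
def quiz4CheckA (s : List Char) : Bool :=
  let length : Int := (s.length : Int)
  if PySem.Int.mod length 2 = 1 ∧
      PySem.List.pyGetD s (PySem.Int.floordiv length 2) ' ' ∉ (['0', '1', '8'] : List Char) then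
    false
  else
    (PySem.List.pyRange 0 (PySem.Int.floordiv length 2) 1).all fun i =>
      (decide (PySem.List.pyGetD s i ' ' ∈ (['0', '1', '8'] : List Char)) &&
        PySem.List.pyGetD s i ' ' == PySem.List.pyGetD s (length - 1 - i) ' ')
      || (PySem.List.pyGetD s i ' ' == '6' && PySem.List.pyGetD s (length - 1 - i) ' ' == '9')
      || (PySem.List.pyGetD s i ' ' == '9' && PySem.List.pyGetD s (length - 1 - i) ' ' == '6')

def isMirrorA (n : Int) : Bool := quiz4CheckA (PySem.Int.toChars n)

def quiz4 (num : Int) : List Int :=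
  (PySem.List.pyRange 0 (num + 1) 1).foldl
    (fun result i => if isMirrorA i then result ++ [i] else result) []

-- ===== PORT B =====
-- _FLIP[c]; in Source B it is only read on keys of _FLIP (guarded by the 'all'), so the final
-- else-branch value is never observed there.
def quiz4Flip (c : Char) : Char := if c == '6' then '9' else if c == '9' then '6' else c

-- c in _FLIP
def quiz4InFlip (c : Char) : Bool := c == '0' || c == '1' || c == '6' || c == '8' || c == '9'

-- mirror(s): all chars are mirrorable and the flipped reversal equals the string
def quiz4MirrorB (s : List Char) : Bool :=
  s.all quiz4InFlip && (s.reverse.map quiz4Flip == s)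

def quiz4_alt (num : Int) : List Int :=
  (PySem.List.pyRange 0 (num + 1) 1).filter fun i => quiz4MirrorB (PySem.Int.toChars i)

-- ===== PRECONDITION & SPEC =====
def Spec_quiz4 (num : Int) (out : List Int) : Prop := out = quiz4_alt num
instance (num : Int) (out : List Int) : Decidable (Spec_quiz4 num out) := by unfold Spec_quiz4; infer_instance

-- ===== CLAIM (what is proved, stated in full; the proofs are below) =====
def Claim_equal_quiz4 : Prop := ∀ (num : Int), Dom_quiz4 num → Spec_quiz4 num (quiz4 num)

-- ===== LEMMAS AND PROOFS =====

-- A's acceptance of the digit pair (s[i], s[length-1-i]) is exactly B's two pointwise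
-- conditions at positions i and length-1-i.
theorem quiz4_pair_iff (a b : Char) :
    ((a ∈ (['0', '1', '8'] : List Char) ∧ a = b) ∨ (a = '6' ∧ b = '9') ∨ (a = '9' ∧ b = '6'))
    ↔ (quiz4InFlip a = true ∧ quiz4InFlip b = true ∧ quiz4Flip b = a ∧ quiz4Flip a = b) := by
  simp only [quiz4InFlip, quiz4Flip, Bool.or_eq_true, beq_iff_eq,
    List.mem_cons, List.not_mem_nil, or_false]
  by_cases h0 : a = '0' <;> by_cases h1 : a = '1' <;> by_cases h8 : a = '8' <;>
    by_cases h6 : a = '6' <;> by_cases h9 : a = '9' <;>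
    by_cases k0 : b = '0' <;> by_cases k1 : b = '1' <;> by_cases k8 : b = '8' <;>
    by_cases k6 : b = '6' <;> by_cases k9 : b = '9' <;> simp_all [ne_comm]

-- A's middle-character test is B's two conditions at the middle position.
theorem quiz4_mid_iff (c : Char) :
    c ∈ (['0', '1', '8'] : List Char) ↔ (quiz4InFlip c = true ∧ quiz4Flip c = c) := by
  simp only [quiz4InFlip, quiz4Flip, Bool.or_eq_true, beq_iff_eq,
    List.mem_cons, List.not_mem_nil, or_false]
  by_cases h0 : c = '0' <;> by_cases h1 : c = '1' <;> by_cases h8 : c = '8' <;>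
    by_cases h6 : c = '6' <;> by_cases h9 : c = '9' <;> simp_all

-- B's check, read off position by position.
theorem quiz4MirrorB_iff (s : List Char) :
    quiz4MirrorB s = true ↔
      ∀ i : Nat, (hi : i < s.length) →
        quiz4InFlip s[i] = true ∧ quiz4Flip (s[s.length - 1 - i]'(by omega)) = s[i] := by
  simp only [quiz4MirrorB, Bool.and_eq_true, List.all_eq_true, beq_iff_eq]
  constructor
  · rintro ⟨h1, h2⟩ i hi
    refine ⟨h1 _ (List.getElem_mem hi), ?_⟩
    rw [List.getElem_of_eq h2.symm hi]
    simp [List.getElem_reverse]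
  · intro h
    constructor
    · intro x hx
      obtain ⟨i, hi, rfl⟩ := List.mem_iff_getElem.mp hx
      exact (h i hi).1
    · apply List.ext_getElem (by simp)
      intro i h1 h2
      simp only [List.getElem_map, List.getElem_reverse]
      exact (h i h2).2

-- A's check, read off position by position (indices turned from Int into Nat).
theorem quiz4CheckA_iff (s : List Char) :
    quiz4CheckA s = true ↔
      ((∀ _ : s.length % 2 = 1,
          quiz4InFlip (s[s.length / 2]'(by omega)) = true ∧
          quiz4Flip (s[s.length / 2]'(by omega)) = s[s.length / 2]'(by omega)) ∧
       ∀ i : Nat, (hi : i < s.length / 2) →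
          quiz4InFlip (s[i]'(by omega)) = true ∧
          quiz4InFlip (s[s.length - 1 - i]'(by omega)) = true ∧
          quiz4Flip (s[s.length - 1 - i]'(by omega)) = s[i]'(by omega) ∧
          quiz4Flip (s[i]'(by omega)) = s[s.length - 1 - i]'(by omega)) := by
  have hmod : PySem.Int.mod ((s.length : Nat) : Int) 2 = ((s.length % 2 : Nat) : Int) := by
    exact_mod_cast PySem.Int.mod_natCast s.length 2
  have hdiv : PySem.Int.floordiv ((s.length : Nat) : Int) 2 = ((s.length / 2 : Nat) : Int) := by
    exact_mod_cast PySem.Int.floordiv_natCast s.length 2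
  have hget : ∀ (i : Int) (h0 : 0 ≤ i) (h1 : i < (s.length : Int)),
      PySem.List.pyGetD s i ' ' = s[i.toNat]'(by omega) :=
    fun i h0 h1 => PySem.List.pyGetD_eq_getElem s ' ' h0 h1
  unfold quiz4CheckA
  simp only [hmod, hdiv]
  split_ifs with hc
  · obtain ⟨hodd', hnm⟩ := hc
    have hodd : s.length % 2 = 1 := by exact_mod_cast hodd'
    have hlt : ((s.length / 2 : Nat) : Int) < (s.length : Int) := by exact_mod_cast (by omega : s.length / 2 < s.length)
    rw [hget _ (by positivity) hlt] at hnm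
    simp only [Int.toNat_natCast] at hnm
    simp only [false_iff, not_and]
    intro hmid _
    exact hnm ((quiz4_mid_iff _).mpr (hmid hodd))
  · rw [List.all_eq_true]
    have hc' : s.length % 2 = 1 → PySem.List.pyGetD s ((s.length / 2 : Nat) : Int) ' ' ∈ (['0', '1', '8'] : List Char) := by
      intro h
      by_contra hn
      exact hc ⟨by exact_mod_cast h, hn⟩
    constructor
    · intro hall
      constructor
      · intro hodd
        have hlt : ((s.length / 2 : Nat) : Int) < (s.length : Int) := by exact_mod_cast (by omega : s.length / 2 < s.length)
        have hm := hc' hodd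
        rw [hget _ (by positivity) hlt] at hm
        simp only [Int.toNat_natCast] at hm
        exact (quiz4_mid_iff _).mp hm
      · intro i hi
        have hmem : ((i : Nat) : Int) ∈ PySem.List.pyRange 0 ((s.length / 2 : Nat) : Int) 1 := by
          rw [PySem.List.mem_pyRange_one]
          exact ⟨by positivity, by exact_mod_cast hi⟩
        have hx := hall _ hmem
        have hi1 : ((i : Nat) : Int) < (s.length : Int) := by exact_mod_cast (by omega : i < s.length)
        have h20 : (0 : Int) ≤ (s.length : Int) - 1 - (i : Nat) := by omega
        have h21 : (s.length : Int) - 1 - (i : Nat) < (s.length : Int) := by omega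
        rw [hget _ (by positivity) hi1, hget _ h20 h21] at hx
        have hidx : ((s.length : Int) - 1 - ((i : Nat) : Int)).toNat = s.length - 1 - i := by omega
        simp only [hidx, Int.toNat_natCast, Bool.or_eq_true, Bool.and_eq_true, beq_iff_eq,
          decide_eq_true_eq] at hx
        exact (quiz4_pair_iff _ _).mp (by tauto)
    · rintro ⟨hmid, hp⟩ x hx
      rw [PySem.List.mem_pyRange_one] at hx
      obtain ⟨hx0, hx1⟩ := hx
      have hk : x = ((x.toNat : Nat) : Int) := by omega
      have hki : x.toNat < s.length / 2 := by omega
      have hi1 : x < (s.length : Int) := by omega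
      have h20 : (0 : Int) ≤ (s.length : Int) - 1 - x := by omega
      have h21 : (s.length : Int) - 1 - x < (s.length : Int) := by omega
      rw [hget _ hx0 hi1, hget _ h20 h21]
      have hidx : ((s.length : Int) - 1 - x).toNat = s.length - 1 - x.toNat := by omega
      simp only [hidx, Bool.or_eq_true, Bool.and_eq_true, beq_iff_eq, decide_eq_true_eq]
      have := (quiz4_pair_iff _ _).mpr (hp x.toNat hki)
      tauto

theorem quiz4CheckA_eq (s : List Char) : quiz4CheckA s = quiz4MirrorB s := by
  rw [Bool.eq_iff_iff, quiz4CheckA_iff, quiz4MirrorB_iff]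
  constructor
  · rintro ⟨hmid, hpair⟩ i hi
    by_cases h1 : i < s.length / 2
    · obtain ⟨ha, _, hf, _⟩ := hpair i h1
      exact ⟨ha, hf⟩
    · by_cases h2 : 2 * i + 1 = s.length
      · have hodd : s.length % 2 = 1 := by omega
        have hieq : i = s.length / 2 := by omega
        have hmir : s.length - 1 - i = i := by omega
        obtain ⟨ha, hf⟩ := hmid hodd
        subst hieq
        simp only [hmir]
        exact ⟨ha, hf⟩
      · have hj : s.length - 1 - i < s.length / 2 := by omega
        obtain ⟨_, hb, _, hf⟩ := hpair (s.length - 1 - i) hj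
        have hmir : s.length - 1 - (s.length - 1 - i) = i := by omega
        simp only [hmir] at hb hf
        exact ⟨hb, hf⟩
  · intro h
    constructor
    · intro hodd
      have hlt : s.length / 2 < s.length := by omega
      obtain ⟨ha, hf⟩ := h (s.length / 2) hlt
      have hmir : s.length - 1 - s.length / 2 = s.length / 2 := by omega
      simp only [hmir] at hf
      exact ⟨ha, hf⟩
    · intro i hi
      have hi' : i < s.length := by omega
      have hj : s.length - 1 - i < s.length := by omega
      obtain ⟨ha, hf⟩ := h i hi'
      obtain ⟨hb, hg⟩ := h (s.length - 1 - i) hj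
      have hmir : s.length - 1 - (s.length - 1 - i) = i := by omega
      simp only [hmir] at hg
      exact ⟨ha, hb, hf, hg⟩

-- ===== VERDICT (by name: the statement is the Claim_ definition above) =====
theorem quiz4_spec : Claim_equal_quiz4 := by
  intro num _
  unfold Spec_quiz4 quiz4 quiz4_alt
  rw [PySem.List.foldl_append_if isMirrorA (fun i => i)]
  simp only [List.nil_append, List.map_id']
  congr 1
  funext i
  exact quiz4CheckA_eq (PySem.Int.toChars i)
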